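-- pv_equiv track=rewrite | github.com/TehporP/GregTech6-Translation-Project | DictMapper.py | load_dict
-- ===== SOURCE A (Python) =====
-- def load_dict(rule_list):
--   words=dict()
--   multi=dict()
--   regex=dict()
--   for key_o in rule_list:
--     key=key_o.strip()
--     if key[0]=='#':
--       regex[key[1:]]=rule_list[key_o]
--     elif key[0]=='$':
--       continue
--     else:
--       word_l=[x for x in key.split(' ') if x!='']
--       if len(word_l)==1:
--         words[key]=rule_list[key_o]
--       else:
--         if not word_l[0] in multi:
--           multi[word_l[0]]=list()
--         multi[word_l[0]].append((word_l,rule_list[key_o],))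
--   for k in multi:
--       multi[k].sort(key=(lambda x:len(x[0])),reverse=True)
--   return (words,multi,regex,)
-- ===== SOURCE B (Python) =====
-- def load_dict(rule_list):
--     items = [(k.strip(), rule_list[k]) for k in rule_list]
--     regex = {k[1:]: v for k, v in items if k[0] == '#'}
--     plain = [([x for x in k.split(' ') if x != ''], k, v)
--              for k, v in items if k[0] != '#' and k[0] != '$']
--     words = {k: v for wl, k, v in plain if len(wl) == 1}
--     entries = [(wl, v) for wl, k, v in plain if len(wl) != 1]
--     firsts = list(dict.fromkeys(wl[0] for wl, v in entries))
--     multi = {w: sorted((e for e in entries if e[0][0] == w),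
--                        key=lambda e: len(e[0]), reverse=True)
--              for w in firsts}
--     return (words, multi, regex)
-- ===== Notes on version B (the rewrite author's own statement) =====
-- stated objective: alternative
-- what changed: Replaces A's single mutating loop over three dict accumulators (with in-place bucket creation/append and a final per-bucket sort) by a comprehension pipeline: strip once, partition entries by first character, then build the multi dict by ordered-dedup of first words with one filter+sort per group.
import Mathlib
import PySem

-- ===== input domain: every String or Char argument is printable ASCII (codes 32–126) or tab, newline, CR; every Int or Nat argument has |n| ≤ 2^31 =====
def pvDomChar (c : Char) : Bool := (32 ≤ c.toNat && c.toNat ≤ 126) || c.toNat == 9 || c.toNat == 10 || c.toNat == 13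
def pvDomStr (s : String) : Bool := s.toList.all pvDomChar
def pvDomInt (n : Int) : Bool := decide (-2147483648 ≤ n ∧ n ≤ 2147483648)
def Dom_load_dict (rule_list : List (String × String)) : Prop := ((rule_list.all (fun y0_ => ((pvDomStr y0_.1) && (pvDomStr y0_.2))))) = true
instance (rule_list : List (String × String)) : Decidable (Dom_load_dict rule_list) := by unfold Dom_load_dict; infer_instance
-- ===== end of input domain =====

-- B replaces A's single mutating loop over three dict accumulators by a comprehension pipeline:
-- strip once, partition by first character, then group multiword entries by ordered-dedup of
-- first words with one filter+sort per group (objective: alternative decomposition, same results).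
-- Equivalence of RETURN values only; neither implementation mutates its argument observably.

-- ===== PORT A =====
-- one step of A's 'for key_o in rule_list' loop; state = (words, multi, regex)
def pvStepA (acc : PySem.Dict String String × PySem.Dict String (List (List String × String)) × PySem.Dict String String)
    (kv : String × String) :
    PySem.Dict String String × PySem.Dict String (List (List String × String)) × PySem.Dict String String :=
  let key := PySem.Str.strip kv.1
  match key.toList with
  | [] => acc      -- Python raises IndexError at key[0]; excluded by Pre_load_dict
  | c :: rest =>
    if c = '#' then (acc.1, acc.2.1, acc.2.2.insert (String.ofList rest) kv.2)
    else if c = '$' then acc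
    else
      let word_l := (((PySem.Str.split? key " ").getD [])).filter (fun x => x ≠ "")
      if word_l.length = 1 then (acc.1.insert key kv.2, acc.2.1, acc.2.2)
      else
        -- 'if not word_l[0] in multi: multi[word_l[0]]=list()' then 'multi[word_l[0]].append(...)'
        let w := word_l.headD ""   -- word_l[0]; word_l ≠ [] whenever Python reaches this line
        let m := if acc.2.1.contains w then acc.2.1 else acc.2.1.insert w []
        (acc.1, m.modify w [] (fun b => b ++ [(word_l, kv.2)]), acc.2.2)

def load_dict (rule_list : List (String × String)) :
    (List (String × String)) × (List (String × List (List String × String))) × (List (String × String)) :=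
  let fin := rule_list.foldl pvStepA (PySem.Dict.empty, PySem.Dict.empty, PySem.Dict.empty)
  -- 'for k in multi: multi[k].sort(key=lambda x: len(x[0]), reverse=True)' (in-place per-key sort)
  (fin.1.items,
   fin.2.1.items.map (fun p => (p.1, PySem.List.sorted p.2 (fun e => e.1.length) true)),
   fin.2.2.items)

-- ===== PORT B =====  (each named def is one comprehension stage of Source B)
def pvHead0 (s : String) : Char := s.toList.headD '?'   -- k[0]; '?' only for k = "" (Python raises there; outside Pre_)
def pvFirst (e : List String × String) : String := e.1.headD ""   -- wl[0]; wl ≠ [] on Pre_ inputs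

def pvItems (l : List (String × String)) : List (String × String) :=
  l.map (fun kv => (PySem.Str.strip kv.1, kv.2))

def pvRegexB (l : List (String × String)) : PySem.Dict String String :=
  ((pvItems l).filter (fun kv => pvHead0 kv.1 == '#')).foldl
    (fun d kv => d.insert (String.ofList kv.1.toList.tail) kv.2) PySem.Dict.empty

def pvPlain (l : List (String × String)) : List (List String × String × String) :=
  ((pvItems l).filter (fun kv => pvHead0 kv.1 ≠ '#' && pvHead0 kv.1 ≠ '$')).map
    (fun kv => ((((PySem.Str.split? kv.1 " ").getD [])).filter (fun x => x ≠ ""), kv.1, kv.2))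

def pvWordsB (l : List (String × String)) : PySem.Dict String String :=
  ((pvPlain l).filter (fun t => t.1.length == 1)).foldl
    (fun d t => d.insert t.2.1 t.2.2) PySem.Dict.empty

def pvEntries (l : List (String × String)) : List (List String × String) :=
  ((pvPlain l).filter (fun t => t.1.length ≠ 1)).map (fun t => (t.1, t.2.2))

def pvFirsts (l : List (String × String)) : List String :=
  PySem.List.dedup ((pvEntries l).map pvFirst)

def load_dict_alt (rule_list : List (String × String)) :
    (List (String × String)) × (List (String × List (List String × String))) × (List (String × String)) :=
  ((pvWordsB rule_list).items,
   (pvFirsts rule_list).map (fun w =>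
     (w, PySem.List.sorted ((pvEntries rule_list).filter (fun e => pvFirst e == w)) (fun e => e.1.length) true)),
   (pvRegexB rule_list).items)

-- ===== PRECONDITION & SPEC =====
-- Pre_ excludes (a) entries whose key is empty or whitespace-only — Python A raises IndexError reading its first character —
-- and (b) lists with duplicate keys: the function's argument is a Python dict, which collapses
-- duplicates before A runs, so an association list with duplicates does not denote that input.
def Pre_load_dict (rule_list : List (String × String)) : Prop :=
  (∀ kv ∈ rule_list, PySem.Str.strip kv.1 ≠ "") ∧ (rule_list.map Prod.fst).Nodup
instance (rule_list : List (String × String)) : Decidable (Pre_load_dict rule_list) := by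
  unfold Pre_load_dict; infer_instance

def pvWitness_load_dict : (List (String × String)) :=
  [("hello world", "hw"), ("#pat", "r"), ("$skip", "s"), ("one", "1"), ("hello there world", "x")]

def Spec_load_dict (rule_list : List (String × String)) (out : (List (String × String)) × (List (String × List (List String × String))) × (List (String × String))) : Prop := out = load_dict_alt rule_list
instance (rule_list : List (String × String)) (out : (List (String × String)) × (List (String × List (List String × String))) × (List (String × String))) : Decidable (Spec_load_dict rule_list out) := by
  unfold Spec_load_dict
  letI d4 : DecidableEq (List (String × List (List String × String))) := by
    letI d3 : DecidableEq (List (List String × String)) := inferInstance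
    infer_instance
  infer_instance

-- ===== CLAIM (what is proved, stated in full; the proofs are below) =====
def Claim_equal_load_dict : Prop := ∀ (rule_list : List (String × String)), Dom_load_dict rule_list → Pre_load_dict rule_list → Spec_load_dict rule_list (load_dict rule_list)

-- ===== LEMMAS AND PROOFS =====

-- the dict grouping entries E under the key list K
def pvG (K : List String) (E : List (List String × String)) :
    PySem.Dict String (List (List String × String)) :=
  PySem.Dict.mk (K.map (fun w => (w, E.filter (fun e => pvFirst e == w))))

-- the raw (pre-sort) multi dict that B's grouping describes
def pvMGroup (l : List (String × String)) : PySem.Dict String (List (List String × String)) :=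
  pvG (pvFirsts l) (pvEntries l)

lemma pvG_keys (K : List String) (E : List (List String × String)) : (pvG K E).keys = K := by
  simp [pvG, PySem.Dict.keys_mk, List.map_map, Function.comp_def]

lemma pvG_getD (K : List String) (E : List (List String × String)) {k : String}
    (hK : K.Nodup) (hk : k ∈ K) :
    (pvG K E).getD k [] = E.filter (fun e => pvFirst e == k) := by
  apply PySem.Dict.getD_of_mem_items
  · exact List.mem_map.mpr ⟨k, hk, rfl⟩
  · rw [pvG_keys]; exact hK

-- A's multi-update step turns the grouping of E into the grouping of E ++ [e]
lemma pvG_step (E : List (List String × String)) (e : List String × String) :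
    (if (pvG (PySem.Set.ofList (E.map pvFirst)) E).contains (pvFirst e)
       then pvG (PySem.Set.ofList (E.map pvFirst)) E
       else (pvG (PySem.Set.ofList (E.map pvFirst)) E).insert (pvFirst e) []).modify
        (pvFirst e) [] (fun b => b ++ [e])
      = pvG (PySem.Set.ofList ((E ++ [e]).map pvFirst)) (E ++ [e]) := by
  set w := pvFirst e with hw
  set K := PySem.Set.ofList (E.map pvFirst) with hKdef
  have hKnd : K.Nodup := PySem.Set.nodup_ofList _
  have hK' : PySem.Set.ofList ((E ++ [e]).map pvFirst) = PySem.Set.add K w := by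
    rw [List.map_append, List.map_singleton, PySem.Set.ofList_append_singleton, ← hw]
  by_cases hmem : w ∈ K
  · have hcon : (pvG K E).contains w = true := by
      rw [PySem.Dict.contains_eq_decide_mem_keys, pvG_keys]; simpa using hmem
    rw [if_pos hcon]
    apply PySem.Dict.ext
    have hkeys : ((pvG K E).modify w [] (fun b => b ++ [e])).keys = K := by
      rw [PySem.Dict.keys_modify, PySem.Dict.keys_insert_of_contains _ _ hcon, pvG_keys]
    rw [PySem.Dict.items_eq_map_keys _ (by rw [hkeys]; exact hKnd) [], hkeys,
        hK', PySem.Set.add_of_mem hmem]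
    show _ = List.map (fun w' => (w', (E ++ [e]).filter (fun x => pvFirst x == w'))) K
    apply List.map_congr_left
    intro k hk
    rw [PySem.Dict.getD_modify, List.filter_append, List.filter_singleton]
    by_cases hkw : k = w
    · subst hkw
      rw [if_pos rfl, pvG_getD K E hKnd hk]
      simp [← hw]
    · have hbe : (pvFirst e == k) = false := by
        rw [← hw]; exact beq_eq_false_iff_ne.mpr (fun hh => hkw hh.symm)
      rw [if_neg hkw, pvG_getD K E hKnd hk]
      simp [hbe]
  · have hcon : (pvG K E).contains w = false := by
      rw [PySem.Dict.contains_eq_decide_mem_keys, pvG_keys]; simpa using hmem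
    rw [if_neg (by simp [hcon])]
    apply PySem.Dict.ext
    have hcon2 : ((pvG K E).insert w []).contains w = true :=
      PySem.Dict.contains_insert_self _ _ _
    have hkeys : (((pvG K E).insert w []).modify w [] (fun b => b ++ [e])).keys = K ++ [w] := by
      rw [PySem.Dict.keys_modify, PySem.Dict.keys_insert_of_contains _ _ hcon2,
          PySem.Dict.keys_insert_of_not_contains _ _ hcon, pvG_keys]
    have hnd2 : (K ++ [w]).Nodup := by
      rw [List.nodup_append]
      refine ⟨hKnd, List.nodup_singleton _, ?_⟩
      intro a ha b hb
      rw [List.mem_singleton] at hb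
      subst hb
      exact fun he => hmem (he ▸ ha)
    rw [PySem.Dict.items_eq_map_keys _ (by rw [hkeys]; exact hnd2) [], hkeys,
        hK', PySem.Set.add_of_not_mem hmem]
    show _ = List.map (fun w' => (w', (E ++ [e]).filter (fun x => pvFirst x == w'))) (K ++ [w])
    apply List.map_congr_left
    intro k hk
    rw [PySem.Dict.getD_modify, List.filter_append, List.filter_singleton]
    by_cases hkw : k = w
    · subst hkw
      rw [if_pos rfl, PySem.Dict.getD_insert_self]
      have hE : E.filter (fun x => pvFirst x == w) = [] := by
        apply List.filter_eq_nil_iff.mpr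
        intro x hx
        simp only [beq_iff_eq]
        intro hfx
        exact hmem (hKdef ▸ (PySem.Set.mem_ofList _ _).mpr (List.mem_map.mpr ⟨x, hx, hfx⟩))
      simp [hE, ← hw]
    · have hkK : k ∈ K := by
        rcases List.mem_append.mp hk with h' | h'
        · exact h'
        · exact absurd (List.mem_singleton.mp h') hkw
      have hbe : (pvFirst e == k) = false := by
        rw [← hw]; exact beq_eq_false_iff_ne.mpr (fun hh => hkw hh.symm)
      rw [if_neg hkw, PySem.Dict.getD_insert_of_ne _ _ _ hkw, pvG_getD K E hKnd hkK]
      simp [hbe]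

lemma pvItems_append (l : List (String × String)) (kv : String × String) :
    pvItems (l ++ [kv]) = pvItems l ++ [(PySem.Str.strip kv.1, kv.2)] := by
  simp [pvItems]

-- A's loop equals B's three pipelines (multi still ungrouped-unsorted)
lemma pvLoop_eq (l : List (String × String)) (h : ∀ kv ∈ l, PySem.Str.strip kv.1 ≠ "") :
    l.foldl pvStepA (PySem.Dict.empty, PySem.Dict.empty, PySem.Dict.empty)
      = (pvWordsB l, pvMGroup l, pvRegexB l) := by
  induction l using List.reverseRecOn with
  | nil => rfl
  | append_singleton l kv ih =>
    have hl : ∀ kv' ∈ l, PySem.Str.strip kv'.1 ≠ "" :=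
      fun kv' hm => h kv' (List.mem_append_left _ hm)
    have hkv : PySem.Str.strip kv.1 ≠ "" := h kv (List.mem_append_right _ (List.mem_singleton.mpr rfl))
    have htl : (PySem.Str.strip kv.1).toList ≠ [] := by
      intro hnil
      exact hkv (String.toList_inj.mp (by rw [hnil]; rfl))
    rw [List.foldl_append, List.foldl_cons, List.foldl_nil, ih hl]
    cases hc : (PySem.Str.strip kv.1).toList with
    | nil => exact absurd hc htl
    | cons c rest =>
      have hhead : pvHead0 (PySem.Str.strip kv.1) = c := by simp [pvHead0, hc]
      simp only [pvStepA]
      rw [hc]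
      by_cases h1 : c = '#'
      · -- regex branch
        have hplain : pvPlain (l ++ [kv]) = pvPlain l := by
          simp [pvPlain, pvItems_append, List.filter_append, hhead, h1]
        have hregex : pvRegexB (l ++ [kv]) = (pvRegexB l).insert (String.ofList rest) kv.2 := by
          simp [pvRegexB, pvItems_append, List.filter_append, hhead, h1,
                List.foldl_append, hc]
        simp [h1, hregex, pvWordsB, hplain, pvMGroup, pvFirsts, pvEntries]
      · by_cases h2 : c = '$'
        · have hplain : pvPlain (l ++ [kv]) = pvPlain l := by
            simp [pvPlain, pvItems_append, List.filter_append, hhead, h2]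
          have hregex : pvRegexB (l ++ [kv]) = pvRegexB l := by
            simp [pvRegexB, pvItems_append, List.filter_append, hhead, h2]
          simp [h2, hregex, pvWordsB, hplain, pvMGroup, pvFirsts, pvEntries]
        · have hplain : pvPlain (l ++ [kv]) = pvPlain l ++
              [(((PySem.Str.split? (PySem.Str.strip kv.1) " ").getD []).filter (fun x => x ≠ ""),
                PySem.Str.strip kv.1, kv.2)] := by
            simp [pvPlain, pvItems_append, List.filter_append, hhead, h1, h2]
          have hregex : pvRegexB (l ++ [kv]) = pvRegexB l := by
            simp [pvRegexB, pvItems_append, List.filter_append, hhead, h1]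
          set wl := ((PySem.Str.split? (PySem.Str.strip kv.1) " ").getD []).filter (fun x => x ≠ "") with hwl
          by_cases h3 : wl.length = 1
          · have hwords : pvWordsB (l ++ [kv]) = (pvWordsB l).insert (PySem.Str.strip kv.1) kv.2 := by
              simp [pvWordsB, hplain, List.filter_append, h3,
                    List.foldl_append]
            have hentries : pvEntries (l ++ [kv]) = pvEntries l := by
              simp [pvEntries, hplain, List.filter_append, h3]
            simp [h1, h2, h3, hwords, hregex, pvMGroup, pvFirsts, hentries]
          · have hwords : pvWordsB (l ++ [kv]) = pvWordsB l := by
              simp [pvWordsB, hplain, List.filter_append, h3]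
            have hentries : pvEntries (l ++ [kv]) = pvEntries l ++ [(wl, kv.2)] := by
              simp [pvEntries, hplain, List.filter_append, h3]
            have hmulti : pvMGroup (l ++ [kv])
                = (if (pvMGroup l).contains (wl.headD "") then pvMGroup l
                   else (pvMGroup l).insert (wl.headD "") []).modify
                    (wl.headD "") [] (fun b => b ++ [(wl, kv.2)]) := by
              have := pvG_step (pvEntries l) (wl, kv.2)
              simp only [pvMGroup, pvFirsts, PySem.List.dedup_eq_ofList, hentries]
              rw [← this]
              rfl
            simp [h1, h2, h3, hwords, hregex, hmulti]
  

theorem pv_main (rule_list : List (String × String))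
    (h : ∀ kv ∈ rule_list, PySem.Str.strip kv.1 ≠ "") :
    load_dict rule_list = load_dict_alt rule_list := by
  unfold load_dict load_dict_alt
  rw [pvLoop_eq rule_list h]
  simp [pvMGroup, pvG, List.map_map, Function.comp_def]

-- ===== VERDICT (by name: the statement is the Claim_ definition above) =====
theorem load_dict_spec : Claim_equal_load_dict := by
  intro l _ hpre
  exact pv_main l hpre.1
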